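-- pv_equiv track=rewrite | github.com/ocirne/adventofcode | python/src/aoc/year2020/day14.py | floating_masks
-- ===== SOURCE A (Python) =====
-- def floating_masks(rest, acc=''):
--     if not rest:
--         yield acc
--     else:
--         head = rest[0]
--         if head == 'X':
--             for x in floating_masks(rest[1:], acc + '0'):
--                 yield x
--             for x in floating_masks(rest[1:], acc + '1'):
--                 yield x
--         else:
--             for x in floating_masks(rest[1:], acc + head):
--                 yield x
-- ===== SOURCE B (Python) =====
-- def floating_masks(rest, acc=''):
--     # Iterative breadth-first expansion: keep the list of all prefixes built so far
--     # and widen it at each 'X'; same output order as the recursive version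
--     # (leftmost X varies slowest, '0' before '1').
--     results = [acc]
--     for c in rest:
--         if c == 'X':
--             results = [r + b for r in results for b in '01']
--         else:
--             results = [r + c for r in results]
--     for r in results:
--         yield r
-- ===== Notes on version B (the rewrite author's own statement) =====
-- stated objective: alternative
-- what changed: Replaces A's recursive generator (branching at each 'X' and concatenating sub-generators) with a single iterative left-to-right pass that maintains the list of all prefixes built so far, widening it at each 'X'.
import Mathlib
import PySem

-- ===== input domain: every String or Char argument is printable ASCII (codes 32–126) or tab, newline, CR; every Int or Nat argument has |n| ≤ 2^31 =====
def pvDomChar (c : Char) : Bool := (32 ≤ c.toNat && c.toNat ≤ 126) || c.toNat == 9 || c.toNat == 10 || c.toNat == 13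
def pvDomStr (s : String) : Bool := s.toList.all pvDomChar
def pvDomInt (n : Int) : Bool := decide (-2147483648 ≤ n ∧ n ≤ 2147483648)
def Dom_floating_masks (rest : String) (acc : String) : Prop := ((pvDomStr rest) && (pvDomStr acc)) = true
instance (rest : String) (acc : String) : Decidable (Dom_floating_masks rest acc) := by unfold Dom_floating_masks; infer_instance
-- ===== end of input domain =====

-- B replaces A's recursive generator by one iterative pass keeping the list of all
-- prefixes built so far; same output values and order (equivalence proved below).

-- ===== PORT A =====
-- A's recursion over rest with accumulator acc (strings as lists of chars).
def floating_masks_go : List Char → List Char → List (List Char)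
  | [], acc => [acc]
  | head :: t, acc =>
    if head = 'X' then
      floating_masks_go t (acc ++ ['0']) ++ floating_masks_go t (acc ++ ['1'])
    else
      floating_masks_go t (acc ++ [head])

def floating_masks (rest : String) (acc : String) : List String :=
  (floating_masks_go rest.toList acc.toList).map String.ofList

-- ===== PORT B =====
-- B's loop: fold over rest's characters, widening the list of prefixes at each 'X'.
def floating_masks_alt (rest : String) (acc : String) : List String :=
  let results := rest.toList.foldl (fun results c =>
    if c = 'X' then results.flatMap (fun r => ['0', '1'].map (fun b => r ++ [b]))
    else results.map (fun r => r ++ [c])) [acc.toList]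
  results.map String.ofList

-- ===== PRECONDITION & SPEC =====
def Spec_floating_masks (rest : String) (acc : String) (out : List String) : Prop := out = floating_masks_alt rest acc
instance (rest : String) (acc : String) (out : List String) : Decidable (Spec_floating_masks rest acc out) := by unfold Spec_floating_masks; infer_instance

-- ===== CLAIM (what is proved, stated in full; the proofs are below) =====
def Claim_equal_floating_masks : Prop := ∀ (rest : String) (acc : String), Dom_floating_masks rest acc → Spec_floating_masks rest acc (floating_masks rest acc)

-- ===== LEMMAS AND PROOFS =====

-- B's fold starting from any frontier L equals flat-mapping A's recursion over L.
lemma foldl_step_eq_flatMap_go (rest : List Char) :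
    ∀ (L : List (List Char)),
      rest.foldl (fun results c =>
        if c = 'X' then results.flatMap (fun r => ['0', '1'].map (fun b => r ++ [b]))
        else results.map (fun r => r ++ [c])) L
      = L.flatMap (fun acc => floating_masks_go rest acc) := by
  induction rest with
  | nil =>
    intro L
    simp [floating_masks_go]
  | cons c t ih =>
    intro L
    by_cases hc : c = 'X'
    · subst hc
      rw [List.foldl_cons, if_pos rfl, ih, List.flatMap_assoc]
      refine List.flatMap_congr (fun r _ => ?_)
      simp [floating_masks_go, List.flatMap]
    · simp only [List.foldl_cons, if_neg hc, ih, List.flatMap_map]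
      refine List.flatMap_congr (fun r _ => ?_)
      simp [floating_masks_go, hc]

-- ===== VERDICT (by name: the statement is the Claim_ definition above) =====
theorem floating_masks_spec : Claim_equal_floating_masks := by
  intro rest acc _
  unfold Spec_floating_masks floating_masks floating_masks_alt
  rw [foldl_step_eq_flatMap_go]
  simp
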